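-- pv_equiv track=rewrite | github.com/nordcap/stepik | Stepik-Введение в Python (7-8 классы)/3 Структуры данных/3.1 Словари/task_9.py | love_janre
-- ===== SOURCE A (Python) =====
-- def love_janre(user, dict_user):
--     # поиск любимого жанра
--     lst_love_janre = []
--
--     max_count = 0
--     for arr in dict_user[user].values():
--         if max_count < len(arr):
--             max_count = len(arr)
--     # вернуть все жанры с наибольшим кол-вом прочитанных книг
--     for janre, arr_books in dict_user[user].items():
--         if max_count == len(arr_books):
--             lst_love_janre.append(janre)
--     return lst_love_janre
-- ===== SOURCE B (Python) =====
-- def love_janre(user, dict_user):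
--     # Group genres by number of books read, then pick the bucket of the max count.
--     buckets = {}
--     for janre, books in dict_user[user].items():
--         buckets.setdefault(len(books), []).append(janre)
--     if not buckets:
--         return []
--     return buckets[max(buckets)]
-- ===== Notes on version B (the rewrite author's own statement) =====
-- stated objective: simpler
-- what changed: B groups genres into a dict keyed by book-count in one pass and returns the bucket at the maximum key, instead of A's two separate passes (running-max pass, then filter pass) over the genre dict.
import Mathlib
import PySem

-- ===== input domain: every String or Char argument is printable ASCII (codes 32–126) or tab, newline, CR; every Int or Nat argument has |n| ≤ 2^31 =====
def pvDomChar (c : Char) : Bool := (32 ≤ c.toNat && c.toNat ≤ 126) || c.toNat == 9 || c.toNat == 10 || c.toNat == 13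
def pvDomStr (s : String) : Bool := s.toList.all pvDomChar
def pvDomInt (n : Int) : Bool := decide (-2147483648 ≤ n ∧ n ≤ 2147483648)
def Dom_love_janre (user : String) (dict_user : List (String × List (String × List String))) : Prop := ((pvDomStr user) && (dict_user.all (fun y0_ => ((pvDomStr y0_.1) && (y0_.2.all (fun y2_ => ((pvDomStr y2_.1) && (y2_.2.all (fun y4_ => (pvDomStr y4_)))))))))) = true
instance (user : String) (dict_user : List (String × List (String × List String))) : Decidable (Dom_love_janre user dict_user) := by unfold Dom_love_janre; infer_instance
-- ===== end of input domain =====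

-- B groups the genres into a dict keyed by book-count in one pass and returns the bucket at the
-- maximum key, instead of A's two passes (running max of lengths, then a filter pass); objective: simpler.

-- ===== PORT A =====
def love_janre (user : String) (dict_user : List (String × List (String × List String))) : List String :=
  match (PySem.Dict.mk dict_user).get? user with
  | none => []  -- Python raises KeyError here; excluded by Pre_love_janre
  | some inner =>
    let d := PySem.Dict.mk inner
    let max_count := d.values.foldl (fun mc arr => if mc < arr.length then arr.length else mc) 0
    d.items.foldl (fun lst p => if max_count == p.2.length then lst ++ [p.1] else lst) []

-- ===== PORT B =====
def love_janre_alt (user : String) (dict_user : List (String × List (String × List String))) : List String :=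
  match (PySem.Dict.mk dict_user).get? user with
  | none => []  -- Python raises KeyError here; excluded by Pre_love_janre
  | some inner =>
    let buckets := (PySem.Dict.mk inner).items.foldl
        (fun d p => d.modify p.2.length [] (· ++ [p.1])) PySem.Dict.empty
    match PySem.List.max? buckets.keys (fun k => k) with
    | none => []
    | some best => buckets.getD best []

-- ===== PRECONDITION & SPEC =====
-- Pre_ excludes exactly the inputs where Python's dict_user[user] raises KeyError (both A and B raise there).
def Pre_love_janre (user : String) (dict_user : List (String × List (String × List String))) : Prop :=
  user ∈ dict_user.map Prod.fst
instance (user : String) (dict_user : List (String × List (String × List String))) : Decidable (Pre_love_janre user dict_user) := by unfold Pre_love_janre; infer_instance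
def pvWitness_love_janre : String × (List (String × List (String × List String))) :=
  ("u", [("u", [("fantasy", ["b1", "b2"]), ("crime", ["b3"])])])

def Spec_love_janre (user : String) (dict_user : List (String × List (String × List String))) (out : List String) : Prop := out = love_janre_alt user dict_user
instance (user : String) (dict_user : List (String × List (String × List String))) (out : List String) : Decidable (Spec_love_janre user dict_user out) := by unfold Spec_love_janre; infer_instance

-- ===== CLAIM (what is proved, stated in full; the proofs are below) =====
def Claim_equal_love_janre : Prop := ∀ (user : String) (dict_user : List (String × List (String × List String))), Dom_love_janre user dict_user → Pre_love_janre user dict_user → Spec_love_janre user dict_user (love_janre user dict_user)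

-- ===== LEMMAS AND PROOFS =====

-- B's bucket dict looked up at k is exactly the genres whose book-list has length k, in order.
theorem bucket_getD (inner : List (String × List String)) (best : Nat) :
  ((PySem.Dict.mk inner).items.foldl (fun d p => d.modify p.2.length [] (· ++ [p.1])) PySem.Dict.empty).getD best []
    = (inner.filter (fun p => p.2.length == best)).map Prod.fst := by
  rw [show ((PySem.Dict.mk inner).items.foldl (fun d p => PySem.Dict.modify d p.2.length [] (· ++ [p.1])) PySem.Dict.empty)
      = ((inner.map (fun p => (p.2.length, p.1))).foldl (fun d q => PySem.Dict.modify d q.1 [] (· ++ [q.2])) PySem.Dict.empty) from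
      (List.foldl_map (f := fun p : String × List String => (p.2.length, p.1))
        (g := fun d q => PySem.Dict.modify d q.1 [] (· ++ [q.2]))).symm]
  rw [PySem.Dict.getD_foldl_modify_append]
  simp [List.filter_map, Function.comp_def, List.map_map]

-- B's bucket keys are the distinct book-list lengths in first-occurrence order.
theorem bucket_keys (inner : List (String × List String)) :
  ((PySem.Dict.mk inner).items.foldl (fun d p => d.modify p.2.length [] (· ++ [p.1])) PySem.Dict.empty).keys
    = PySem.Set.ofList (inner.map (fun p => p.2.length)) := by
  rw [PySem.Dict.keys_foldl_modify_key]
  simp [PySem.Set.update_nil_left]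

-- A's running-max loop over the values computes foldl max over the lengths.
theorem maxA_eq (inner : List (String × List String)) :
  (PySem.Dict.mk inner).values.foldl (fun mc arr => if mc < arr.length then arr.length else mc) 0
    = (inner.map (fun p => p.2.length)).foldl max 0 := by
  simp only [PySem.Dict.values, List.foldl_map]
  apply PySem.List.foldl_congr_mem
  intro acc x _
  split <;> omega

-- max() over the distinct lengths equals the running max over all lengths.
theorem maxkey_eq (L : List Nat) (hne : L ≠ []) :
  PySem.List.max? (PySem.Set.ofList L) (fun k => k) = some (L.foldl max 0) := by
  obtain ⟨x, t, rfl⟩ := List.exists_cons_of_ne_nil hne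
  set L := x :: t with hL
  set M := L.foldl max 0 with hM
  have hMub : ∀ y ∈ L, y ≤ M := (PySem.List.le_foldl_max L 0).2
  have hMmem : M ∈ L := by
    rcases PySem.List.foldl_max_mem L 0 with h0 | h
    · have hx : x ≤ M := hMub x (by simp [hL])
      have : M = x := by omega
      simp [this, hL]
    · exact h
  cases h : PySem.List.max? (PySem.Set.ofList L) (fun k => k) with
  | none =>
    have h1 := (PySem.List.max?_eq_none_iff (xs := PySem.Set.ofList L) (key := fun k => k)).mp h
    have h2 : M ∈ PySem.Set.ofList L := (PySem.Set.mem_ofList _ _).mpr hMmem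
    simp_all
  | some b =>
    have hbL : b ∈ L := (PySem.Set.mem_ofList _ _).mp (PySem.List.max?_mem h)
    have hMb : M ≤ b := PySem.List.max?_isMax h M ((PySem.Set.mem_ofList _ _).mpr hMmem)
    have : b = M := Nat.le_antisymm (hMub b hbL) hMb
    rw [this]

theorem core_eq (inner : List (String × List String)) :
    ((PySem.Dict.mk inner).items.foldl
      (fun lst p => if ((PySem.Dict.mk inner).values.foldl (fun mc arr => if mc < arr.length then arr.length else mc) 0) == p.2.length then lst ++ [p.1] else lst) [])
    =
    (match PySem.List.max? ((PySem.Dict.mk inner).items.foldl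
        (fun d p => d.modify p.2.length [] (· ++ [p.1])) PySem.Dict.empty).keys (fun k => k) with
     | none => []
     | some best => ((PySem.Dict.mk inner).items.foldl
        (fun d p => d.modify p.2.length [] (· ++ [p.1])) PySem.Dict.empty).getD best []) := by
  rcases eq_or_ne inner [] with rfl | hne
  · rfl
  · have hLne : inner.map (fun p => p.2.length) ≠ [] := by
      simpa using hne
    rw [maxA_eq, bucket_keys, maxkey_eq _ hLne]
    change _ = PySem.Dict.getD _ _ []
    rw [bucket_getD]
    rw [PySem.List.foldl_append_if
      (p := fun p : String × List String => (inner.map (fun p => p.2.length)).foldl max 0 == p.2.length)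
      (f := Prod.fst)]
    simp only [List.nil_append]
    congr 1
    apply List.filter_congr
    intro p _
    exact BEq.comm

-- ===== VERDICT (by name: the statement is the Claim_ definition above) =====
theorem love_janre_spec : Claim_equal_love_janre := by
  intro user dict_user _ _
  unfold Spec_love_janre love_janre love_janre_alt
  cases h : (PySem.Dict.mk dict_user).get? user with
  | none => rfl
  | some inner => exact core_eq inner
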